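-- pv_equiv track=rewrite | github.com/setonthen/PycharmProjects | introduction-to-programming/introduction to programming/round06/Fully justified text.py | find_num_of_char
-- ===== SOURCE A (Python) =====
-- def find_num_of_char(list,poss):
--     count=0
--     tot=0
--     for x in range(len(list)):
--         if tot<poss:
--             tot+=len(list[x])
--             count+=1
--         else:
--             x=len(list)
--     return count
-- ===== SOURCE B (Python) =====
-- def find_num_of_char(list, poss):
--     # Build the table of prefix sums of word lengths, then count how many
--     # prefixes (over the word indices) are still below poss.
--     prefixes = [0]
--     for w in list:
--         prefixes.append(prefixes[-1] + len(w))
--     return sum(1 for i in range(len(list)) if prefixes[i] < poss)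
-- ===== Notes on version B (the rewrite author's own statement) =====
-- stated objective: alternative
-- what changed: Replaces the fused accumulate-and-count loop carrying (count, tot) state with a build-the-prefix-sum-table pass followed by a separate counting scan over the indices.
import Mathlib
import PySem

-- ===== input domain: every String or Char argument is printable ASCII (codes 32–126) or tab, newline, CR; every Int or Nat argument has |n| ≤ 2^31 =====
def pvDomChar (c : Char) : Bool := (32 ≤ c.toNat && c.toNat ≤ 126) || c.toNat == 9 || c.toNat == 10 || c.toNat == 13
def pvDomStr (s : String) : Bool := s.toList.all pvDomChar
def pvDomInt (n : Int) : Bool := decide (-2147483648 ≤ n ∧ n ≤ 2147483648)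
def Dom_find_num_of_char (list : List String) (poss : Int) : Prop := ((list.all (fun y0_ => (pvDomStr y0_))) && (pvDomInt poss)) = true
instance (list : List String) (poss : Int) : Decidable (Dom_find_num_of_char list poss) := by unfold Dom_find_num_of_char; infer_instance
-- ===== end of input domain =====

-- B replaces A's fused accumulate-and-count loop with a prefix-sum table built first,
-- then a separate counting scan (alternative decomposition; same O(n) cost).

-- ===== PORT A =====
def find_num_of_char (list : List String) (poss : Int) : Int :=
  -- count=0; tot=0; for x in range(len(list)): if tot<poss: tot+=len(list[x]); count+=1 (else branch is a no-op)
  ((PySem.List.pyRange 0 (PySem.List.len list) 1).foldl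
    (fun (s : Int × Int) x =>
      if s.2 < poss then (s.1 + 1, s.2 + PySem.Str.len (PySem.List.pyGetD list x "")) else s)
    (0, 0)).1

-- ===== PORT B =====
def find_num_of_char_alt (list : List String) (poss : Int) : Int :=
  -- prefixes = [0]; for w in list: prefixes.append(prefixes[-1] + len(w))
  let prefixes := list.foldl
    (fun (ps : List Int) w => ps ++ [PySem.List.pyGetD ps (-1) 0 + PySem.Str.len w]) [0]
  -- sum(1 for i in range(len(list)) if prefixes[i] < poss)
  (((PySem.List.pyRange 0 (PySem.List.len list) 1).filter
    (fun i => PySem.List.pyGetD prefixes i 0 < poss)).length : Int)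

-- ===== PRECONDITION & SPEC =====
def Spec_find_num_of_char (list : List String) (poss : Int) (out : Int) : Prop := out = find_num_of_char_alt list poss
instance (list : List String) (poss : Int) (out : Int) : Decidable (Spec_find_num_of_char list poss out) := by unfold Spec_find_num_of_char; infer_instance

-- ===== CLAIM (what is proved, stated in full; the proofs are below) =====
def Claim_equal_find_num_of_char : Prop := ∀ (list : List String) (poss : Int), Dom_find_num_of_char list poss → Spec_find_num_of_char list poss (find_num_of_char list poss)

-- ===== LEMMAS AND PROOFS =====

-- sum of lengths of the first k words
def pvSumTake (ws : List String) (k : Nat) : Int := ((ws.take k).map PySem.Str.len).sum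

-- common recursive specification of both programs
def pvCnt (ws : List String) (poss : Int) : Int :=
  match ws with
  | [] => 0
  | w :: ws => if 0 < poss then 1 + pvCnt ws (poss - PySem.Str.len w) else 0

lemma pvSumTake_zero (ws : List String) : pvSumTake ws 0 = 0 := rfl

lemma pvSumTake_succ (w : String) (ws : List String) (k : Nat) :
    pvSumTake (w :: ws) (k + 1) = PySem.Str.len w + pvSumTake ws k := by
  simp [pvSumTake, List.take_succ_cons]

lemma pvSumTake_nonneg (ws : List String) (k : Nat) : 0 ≤ pvSumTake ws k := by
  induction ws generalizing k with
  | nil => simp [pvSumTake]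
  | cons w ws ih =>
    cases k with
    | zero => simp [pvSumTake]
    | succ k =>
      rw [pvSumTake_succ]
      have h1 : (0:Int) ≤ PySem.Str.len w := by
        rw [PySem.Str.len_eq]; exact Int.natCast_nonneg _
      have := ih k
      omega

-- A's inner loop, as a fold over the words
def pvStepA (poss : Int) (s : Int × Int) (w : String) : Int × Int :=
  if s.2 < poss then (s.1 + 1, s.2 + PySem.Str.len w) else s

lemma pvFoldA_stuck (poss : Int) (ws : List String) (c t : Int) (h : ¬ t < poss) :
    ws.foldl (pvStepA poss) (c, t) = (c, t) := by
  induction ws with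
  | nil => rfl
  | cons w ws ih => simp [pvStepA, h, ih]

lemma pvFoldA_eq_cnt (ws : List String) (poss : Int) :
    (ws.foldl (pvStepA poss) (0, 0)).1 = pvCnt ws poss := by
  induction ws generalizing poss with
  | nil => rfl
  | cons w ws ih =>
    by_cases h : 0 < poss
    · -- shift the start state back to (0,0) with an adjusted poss
      have shift : ∀ (vs : List String) (p c t : Int),
          vs.foldl (pvStepA p) (c, t)
            = (c + (vs.foldl (pvStepA (p - t)) (0, 0)).1,
               t + (vs.foldl (pvStepA (p - t)) (0, 0)).2) := by
        intro vs
        induction vs with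
        | nil => intro p c t; simp
        | cons v vs ihv =>
          intro p c t
          by_cases hv : t < p
          · have hv0 : (0 : Int) < p - t := by omega
            simp only [List.foldl_cons, pvStepA, if_pos hv, if_pos hv0, zero_add]
            rw [ihv p (c + 1) (t + PySem.Str.len v),
                ihv (p - t) 1 (PySem.Str.len v)]
            have : p - (t + PySem.Str.len v) = p - t - PySem.Str.len v := by ring
            rw [this]
            refine Prod.ext ?_ ?_ <;> simp <;> ring
          · have hv0 : ¬ (0 : Int) < p - t := by omega
            simp only [List.foldl_cons, pvStepA, if_neg hv, if_neg hv0]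
            rw [pvFoldA_stuck _ _ _ _ hv, pvFoldA_stuck _ _ _ _ hv0]
            simp
      simp only [List.foldl_cons, pvStepA, if_pos h, zero_add]
      rw [shift ws poss 1 (PySem.Str.len w)]
      simp only [pvCnt, if_pos h]
      rw [ih (poss - PySem.Str.len w)]
    · simp only [List.foldl_cons, pvStepA]
      rw [if_neg (show ¬ (((0 : Int), (0 : Int)).2 < poss) from h)]
      rw [pvFoldA_stuck poss ws 0 0 h]
      simp [pvCnt, h]

lemma find_num_of_char_eq_cnt (ws : List String) (poss : Int) :
    find_num_of_char ws poss = pvCnt ws poss := by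
  unfold find_num_of_char
  rw [show (PySem.List.len ws) = ((ws.length : Int)) from PySem.List.len_eq ws,
      PySem.List.foldl_pyRange_zero_pyGetD' ws ""
        (fun (s : Int × Int) w =>
          if s.2 < poss then (s.1 + 1, s.2 + PySem.Str.len w) else s) (0, 0)]
  exact pvFoldA_eq_cnt ws poss

-- B's prefix-table builder
def pvStepB (ps : List Int) (w : String) : List Int :=
  ps ++ [PySem.List.pyGetD ps (-1) 0 + PySem.Str.len w]

-- the tail of the prefix table: running sums starting from t
def pvScan (ws : List String) (t : Int) : List Int :=
  match ws with
  | [] => []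
  | w :: ws => (t + PySem.Str.len w) :: pvScan ws (t + PySem.Str.len w)

lemma pvBuild (ws : List String) : ∀ (p : List Int) (t : Int),
    ws.foldl pvStepB (p ++ [t]) = p ++ [t] ++ pvScan ws t := by
  induction ws with
  | nil => intro p t; simp [pvScan]
  | cons w ws ih =>
    intro p t
    simp only [List.foldl_cons, pvStepB, PySem.List.pyGetD_neg_one_append_singleton]
    rw [show p ++ [t] ++ [t + PySem.Str.len w] = (p ++ [t]) ++ [t + PySem.Str.len w] by simp,
        ih (p ++ [t]) (t + PySem.Str.len w)]
    simp [pvScan]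

lemma pvScan_get (ws : List String) : ∀ (t : Int) (k : Nat), k < ws.length →
    (pvScan ws t).getD k 0 = t + pvSumTake ws (k + 1) := by
  induction ws with
  | nil => intro t k h; simp at h
  | cons w ws ih =>
    intro t k h
    cases k with
    | zero => simp [pvScan, pvSumTake]
    | succ k =>
      simp only [pvScan, List.getD_cons_succ]
      rw [ih (t + PySem.Str.len w) k (by simpa using h), pvSumTake_succ]
      ring

lemma pvPrefix_get (ws : List String) (k : Nat) (h : k ≤ ws.length) :
    (ws.foldl pvStepB [0]).getD k 0 = pvSumTake ws k := by
  have := pvBuild ws [] 0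
  simp only [List.nil_append] at this
  rw [show ws.foldl pvStepB [0] = ws.foldl pvStepB ([] ++ [0]) by simp, pvBuild ws [] 0]
  cases k with
  | zero => simp [pvSumTake]
  | succ k =>
    simp only [List.nil_append, List.singleton_append, List.getD_cons_succ]
    rw [pvScan_get ws 0 k (by omega)]
    simp

lemma pvCnt_eq_countP (ws : List String) (poss : Int) :
    pvCnt ws poss = ((List.range ws.length).countP (fun k => pvSumTake ws k < poss) : Int) := by
  induction ws generalizing poss with
  | nil => simp [pvCnt]
  | cons w ws ih =>
    have hlen : (w :: ws).length = ws.length + 1 := rfl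
    rw [hlen, List.range_succ_eq_map, List.countP_cons]
    have hmap : (List.map Nat.succ (List.range ws.length)).countP
        (fun k => decide (pvSumTake (w :: ws) k < poss))
        = (List.range ws.length).countP (fun k => decide (pvSumTake ws k < poss - PySem.Str.len w)) := by
      rw [List.countP_map]
      apply List.countP_congr
      intro k _
      simp only [Function.comp_apply]
      rw [show Nat.succ k = k + 1 from rfl, pvSumTake_succ]
      simp only [decide_eq_true_eq]
      omega
    by_cases h : 0 < poss
    · simp only [pvCnt, if_pos h, ih (poss - PySem.Str.len w)]
      rw [hmap]
      simp [pvSumTake_zero, h]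
      ring
    · simp only [pvCnt, if_neg h]
      have hz : ∀ k, ¬ (pvSumTake ws k < poss - PySem.Str.len w) := by
        intro k
        have := pvSumTake_nonneg ws k
        have h1 : (0:Int) ≤ PySem.Str.len w := by
          rw [PySem.Str.len_eq]; exact Int.natCast_nonneg _
        omega
      rw [hmap]
      have : (List.range ws.length).countP (fun k => decide (pvSumTake ws k < poss - PySem.Str.len w)) = 0 := by
        apply List.countP_eq_zero.mpr
        intro k _
        simpa using hz k
      rw [this]
      simp [pvSumTake_zero, h]

lemma find_num_of_char_alt_eq (ws : List String) (poss : Int) :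
    find_num_of_char_alt ws poss
      = ((List.range ws.length).countP (fun k => pvSumTake ws k < poss) : Int) := by
  unfold find_num_of_char_alt
  simp only [PySem.List.len_eq]
  rw [PySem.List.pyRange_one]
  simp only [sub_zero, Int.toNat_natCast, List.filter_map, List.length_map]
  rw [List.countP_eq_length_filter]
  norm_cast
  refine congrArg List.length (List.filter_congr ?_)
  intro k hk
  have hk' : k < ws.length := List.mem_range.mp hk
  simp only [Function.comp_apply, zero_add, PySem.List.pyGetD_natCast]
  rw [decide_eq_decide]
  have hfold : (ws.foldl (fun ps w => ps ++ [PySem.List.pyGetD ps (Int.negSucc 0) 0 + PySem.Str.len w]) [0])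
      = ws.foldl pvStepB [0] := rfl
  rw [hfold, pvPrefix_get ws k (le_of_lt hk')]

-- ===== VERDICT (by name: the statement is the Claim_ definition above) =====
theorem find_num_of_char_spec : Claim_equal_find_num_of_char := by
  intro list poss _
  unfold Spec_find_num_of_char
  rw [find_num_of_char_eq_cnt, find_num_of_char_alt_eq, pvCnt_eq_countP]
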